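-- pv_equiv track=rewrite | github.com/tjp2021/brainflowy | backend/app/services/outline_service.py | get_item_and_children
-- ===== SOURCE A (Python) =====
-- from typing import List, Dict, Any, Optional, Set
--
-- def get_item_and_children(items: List[Dict[str, Any]], item_id: str) -> Set[str]:
--     """Get an item and all its descendant IDs"""
--     ids_to_remove = {item_id}
--
--     # Find all children recursively
--     def find_children(parent_id: str):
--         for item in items:
--             if item.get("parentId") == parent_id:
--                 ids_to_remove.add(item["id"])
--                 find_children(item["id"])
--
--     find_children(item_id)
--     return ids_to_remove
-- ===== SOURCE B (Python) =====
-- def get_item_and_children(items, item_id):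
--     """Get an item and all its descendant IDs"""
--     # Alternative traversal: build parentId -> [child ids] adjacency once, then one visited-guarded DFS.
--     children = {}
--     for item in items:
--         if "id" in item:
--             children.setdefault(item.get("parentId"), []).append(item["id"])
--
--     ids_to_remove = {item_id}
--
--     def dfs(parent_id):
--         for cid in children.get(parent_id, []):
--             if cid not in ids_to_remove:
--                 ids_to_remove.add(cid)
--                 dfs(cid)
--
--     dfs(item_id)
--     return ids_to_remove
-- ===== Notes on version B (the rewrite author's own statement) =====
-- stated objective: alternative
-- what changed: B precomputes a parentId->children adjacency dict in one pass and runs a single visited-guarded DFS, instead of A's rescan of the whole item list at every recursive call (and A's unguarded re-descent into already-collected ids).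
import Mathlib
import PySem

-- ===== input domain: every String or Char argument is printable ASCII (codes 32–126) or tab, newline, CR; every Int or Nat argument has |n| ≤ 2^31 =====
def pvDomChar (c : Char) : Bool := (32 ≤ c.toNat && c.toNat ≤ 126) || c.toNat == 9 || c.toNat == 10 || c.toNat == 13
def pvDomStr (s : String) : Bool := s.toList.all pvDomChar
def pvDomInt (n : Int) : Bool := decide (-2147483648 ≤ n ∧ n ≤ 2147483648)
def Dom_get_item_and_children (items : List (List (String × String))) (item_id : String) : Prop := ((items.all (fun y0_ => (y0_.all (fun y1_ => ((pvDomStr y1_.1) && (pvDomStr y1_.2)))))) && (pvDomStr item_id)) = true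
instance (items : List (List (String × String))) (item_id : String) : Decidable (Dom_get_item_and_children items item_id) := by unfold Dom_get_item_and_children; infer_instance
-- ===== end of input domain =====

-- B replaces A's per-node rescan of all items by a parentId→children dict built once plus one
-- visited-guarded DFS (objective: alternative traversal; equal return value on Pre_).

-- dict.get(k) / dict[k] on an input dict given as an association list (first match)
def pvGetKey (d : List (String × String)) (k : String) : Option String :=
  (PySem.Dict.mk d).get? k

-- ===== PORT A =====
-- find_children: outer fuel-bounded recursion (fuel suffices on every input Pre_ admits:
-- the DFS depth is bounded by the number of distinct ids when no reachable cycle exists);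
-- `rest` is the position of the `for item in items` scan.
def findAaux (items : List (List (String × String))) :
    Nat → List (List (String × String)) → List String → String → List String
  | _, [], s, _ => s
  | fuel, item :: rest, s, pid =>
    if pvGetKey item "parentId" == some pid then
      match pvGetKey item "id" with
      | some cid =>
        let s' := PySem.Set.add s cid
        let s'' := match fuel with
          | 0 => s'                                  -- fuel exhausted: never reached under Pre_
          | f + 1 => findAaux items f items s' cid   -- find_children(item["id"])
        findAaux items fuel rest s'' pid
      | none => s                                    -- Python raises KeyError here; excluded by Pre_
    else findAaux items fuel rest s pid
termination_by fuel rest => (fuel, rest.length)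

def get_item_and_children (items : List (List (String × String))) (item_id : String) : List String :=
  findAaux items (items.length + 1) items (PySem.Set.ofList [item_id]) item_id

-- ===== PORT B =====
-- children.setdefault(item.get("parentId"), []).append(item["id"])  for items having an "id"
def pvAdj (items : List (List (String × String))) : PySem.Dict (Option String) (List String) :=
  items.foldl (fun adj item =>
    match pvGetKey item "id" with
    | some cid => adj.modify (pvGetKey item "parentId") [] (fun l => l ++ [cid])
    | none => adj) PySem.Dict.empty

-- dfs: iterate the child list of the current node, visiting each unseen child once (fuel as in A)
def dfsB (adj : PySem.Dict (Option String) (List String)) :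
    Nat → List String → List String → List String
  | _, [], s => s
  | fuel, cid :: cs, s =>
    if PySem.Set.contains s cid then dfsB adj fuel cs s
    else
      let s' := PySem.Set.add s cid
      let s'' := match fuel with
        | 0 => s'                                    -- fuel exhausted: never reached under Pre_
        | f + 1 => dfsB adj f (adj.getD (some cid) []) s'   -- dfs(cid)
      dfsB adj fuel cs s''
termination_by fuel cs => (fuel, cs.length)

def get_item_and_children_alt (items : List (List (String × String))) (item_id : String) : List String :=
  let adj := pvAdj items
  dfsB adj (items.length + 1) (adj.getD (some item_id) []) (PySem.Set.ofList [item_id])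

-- ===== PRECONDITION & SPEC =====
-- the ids of the items whose parentId is pid, in items order (items without an "id" skipped)
def pvChildrenOf (l : List (List (String × String))) (pid : String) : List String :=
  l.filterMap (fun d => if pvGetKey d "parentId" == some pid then pvGetKey d "id" else none)

-- pvReach items k a b: b is reachable from a in at most k parent→child steps
def pvReach (items : List (List (String × String))) : Nat → String → String → Bool
  | 0, a, b => a == b
  | k + 1, a, b => a == b || (pvChildrenOf items a).any (fun c => pvReach items k c b)

def pvIds (items : List (List (String × String))) : List String :=
  items.filterMap (fun d => pvGetKey d "id")

-- Pre_ excludes exactly the inputs where the Python A does not return: a reachable item without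
-- an "id" key (KeyError) or a reachable cycle of parentId links (infinite recursion).
def Pre_get_item_and_children (items : List (List (String × String))) (item_id : String) : Prop :=
  (items.all (fun d =>
    match pvGetKey d "parentId" with
    | some p => !(pvReach items (items.length + 1) item_id p) || (pvGetKey d "id").isSome
    | none => true)) = true
  ∧ ((item_id :: pvIds items).all (fun v =>
      !(pvReach items (items.length + 1) item_id v)
      || (pvChildrenOf items v).all (fun c => !(pvReach items (items.length + 1) c v)))) = true

instance (items : List (List (String × String))) (item_id : String) :
    Decidable (Pre_get_item_and_children items item_id) := by
  unfold Pre_get_item_and_children; infer_instance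

def pvWitness_get_item_and_children : (List (List (String × String))) × String :=
  ([[("id", "a"), ("parentId", "r")], [("id", "b"), ("parentId", "a")]], "r")

def Spec_get_item_and_children (items : List (List (String × String))) (item_id : String) (out : List String) : Prop := out = get_item_and_children_alt items item_id
instance (items : List (List (String × String))) (item_id : String) (out : List String) : Decidable (Spec_get_item_and_children items item_id out) := by unfold Spec_get_item_and_children; infer_instance

-- ===== CLAIM (what is proved, stated in full; the proofs are below) =====
def Claim_equal_get_item_and_children : Prop := ∀ (items : List (List (String × String))) (item_id : String), Dom_get_item_and_children items item_id → Pre_get_item_and_children items item_id → Spec_get_item_and_children items item_id (get_item_and_children items item_id)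

-- ===== LEMMAS AND PROOFS =====

-- abstract reachability (any number of steps)
def pvRS (items : List (List (String × String))) (a b : String) : Prop :=
  ∃ k, pvReach items k a b = true

-- the current DFS path, child first, ending at item_id; consecutive elements are parent links
def pvPathUp (items : List (List (String × String))) (item_id : String) : List String → Prop
  | [] => False
  | [a] => a = item_id
  | a :: b :: rest => a ∈ pvChildrenOf items b ∧ pvPathUp items item_id (b :: rest)

lemma pvReach_zero {items : List (List (String × String))} {a b : String} :
    pvReach items 0 a b = true ↔ a = b := by
  simp only [pvReach, beq_iff_eq]

lemma pvReach_succ {items : List (List (String × String))} {k : Nat} {a b : String} :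
    pvReach items (k + 1) a b = true
      ↔ a = b ∨ ∃ c ∈ pvChildrenOf items a, pvReach items k c b = true := by
  simp only [pvReach, Bool.or_eq_true, beq_iff_eq, List.any_eq_true]

lemma pvReach_refl (items : List (List (String × String))) (k : Nat) (a : String) :
    pvReach items k a a = true := by
  cases k with
  | zero => exact pvReach_zero.mpr rfl
  | succ k => exact pvReach_succ.mpr (Or.inl rfl)

lemma pvReach_mono (items : List (List (String × String))) {k m : Nat} {a b : String}
    (h : pvReach items k a b = true) (hkm : k ≤ m) : pvReach items m a b = true := by
  induction k generalizing a m with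
  | zero =>
    rw [pvReach_zero.mp h]; exact pvReach_refl items m b
  | succ k ih =>
    rcases pvReach_succ.mp h with h' | ⟨c, hc, hr⟩
    · rw [h']; exact pvReach_refl items m b
    · obtain ⟨m', rfl⟩ : ∃ m', m = m' + 1 := ⟨m - 1, by omega⟩
      exact pvReach_succ.mpr (Or.inr ⟨c, hc, ih hr (by omega)⟩)

lemma pvReach_trans (items : List (List (String × String))) {k m : Nat} {a b c : String}
    (h1 : pvReach items k a b = true) (h2 : pvReach items m b c = true) :
    pvReach items (k + m) a c = true := by
  induction k generalizing a with
  | zero =>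
    rw [pvReach_zero.mp h1]; exact pvReach_mono items h2 (by omega)
  | succ k ih =>
    rcases pvReach_succ.mp h1 with h' | ⟨d, hd, hr⟩
    · rw [h']; exact pvReach_mono items h2 (by omega)
    · have hkm : k + 1 + m = (k + m) + 1 := by omega
      rw [hkm]
      exact pvReach_succ.mpr (Or.inr ⟨d, hd, ih hr⟩)

lemma pvRS_refl (items : List (List (String × String))) (a : String) : pvRS items a a :=
  ⟨0, pvReach_refl items 0 a⟩

lemma pvRS_cons (items : List (List (String × String))) {a c y : String}
    (hc : c ∈ pvChildrenOf items a) (h : pvRS items c y) : pvRS items a y := by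
  obtain ⟨k, hk⟩ := h
  exact ⟨k + 1, pvReach_succ.mpr (Or.inr ⟨c, hc, hk⟩)⟩

lemma pvRS_trans (items : List (List (String × String))) {a b c : String}
    (h1 : pvRS items a b) (h2 : pvRS items b c) : pvRS items a c := by
  obtain ⟨k, hk⟩ := h1; obtain ⟨m, hm⟩ := h2
  exact ⟨k + m, pvReach_trans items hk hm⟩

lemma pvRS_destruct (items : List (List (String × String))) {a y : String}
    (h : pvRS items a y) : y = a ∨ ∃ c ∈ pvChildrenOf items a, pvRS items c y := by
  obtain ⟨k, hk⟩ := h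
  cases k with
  | zero => exact Or.inl (pvReach_zero.mp hk).symm
  | succ k =>
    rcases pvReach_succ.mp hk with h' | ⟨c, hc, hr⟩
    · exact Or.inl h'.symm
    · exact Or.inr ⟨c, hc, k, hr⟩

-- appending one edge at the far end of a bounded reach
lemma pvReach_snoc (items : List (List (String × String))) {k : Nat} {x b a : String}
    (h : pvReach items k x b = true) (ha : a ∈ pvChildrenOf items b) :
    pvReach items (k + 1) x a = true := by
  induction k generalizing x with
  | zero =>
    rw [pvReach_zero.mp h]
    exact pvReach_succ.mpr (Or.inr ⟨a, ha, pvReach_zero.mpr rfl⟩)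
  | succ k ih =>
    rcases pvReach_succ.mp h with h' | ⟨c, hc, hr⟩
    · rw [h']
      have h1 : pvReach items (0 + 1) b a = true :=
        pvReach_succ.mpr (Or.inr ⟨a, ha, pvReach_zero.mpr rfl⟩)
      exact pvReach_mono items h1 (by omega)
    · exact pvReach_succ.mpr (Or.inr ⟨c, hc, ih hr⟩)

-- members of a child list are ids
lemma mem_children_mem_ids (items : List (List (String × String))) {pid c : String}
    (h : c ∈ pvChildrenOf items pid) : c ∈ pvIds items := by
  simp only [pvChildrenOf, List.mem_filterMap] at h
  obtain ⟨d, hd, hif⟩ := h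
  by_cases hp : (pvGetKey d "parentId" == some pid) = true
  · rw [if_pos hp] at hif
    simp only [pvIds, List.mem_filterMap]
    exact ⟨d, hd, hif⟩
  · rw [if_neg hp] at hif; cases hif

-- every element of a path reaches its head within path-length steps
lemma pvPathUp_reach_head (items : List (List (String × String))) (item_id : String) :
    ∀ (t : List String) (a x : String), pvPathUp items item_id (a :: t) → x ∈ a :: t →
      ∃ k, k < (a :: t).length ∧ pvReach items k x a = true := by
  intro t
  induction t with
  | nil =>
    intro a x _ hx
    rw [List.mem_singleton] at hx; subst hx
    exact ⟨0, by simp, pvReach_refl items 0 x⟩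
  | cons b rest ih =>
    intro a x hp hx
    obtain ⟨hedge, hp'⟩ := hp
    rcases List.mem_cons.mp hx with rfl | hx'
    · exact ⟨0, by simp, pvReach_refl items 0 x⟩
    · obtain ⟨k, hk, hr⟩ := ih b x hp' hx'
      refine ⟨k + 1, ?_, pvReach_snoc items hr hedge⟩
      simp only [List.length_cons] at hk ⊢
      omega

lemma pvPathUp_bottom (items : List (List (String × String))) (item_id : String) :
    ∀ (p : List String), pvPathUp items item_id p → item_id ∈ p := by
  intro p
  induction p with
  | nil => intro h; exact absurd h (by simp [pvPathUp])
  | cons a t ih =>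
    intro h
    cases t with
    | nil =>
      have h' : a = item_id := h
      rw [h']; exact List.mem_singleton.mpr rfl
    | cons b rest => exact List.mem_cons_of_mem a (ih h.2)

lemma pvPathUp_head_mem_V (items : List (List (String × String))) (item_id : String) :
    ∀ (t : List String) (a : String), pvPathUp items item_id (a :: t) →
      a ∈ item_id :: pvIds items := by
  intro t a h
  cases t with
  | nil =>
    have h' : a = item_id := h
    rw [h']; exact List.mem_cons_self
  | cons b rest => exact List.mem_cons_of_mem _ (mem_children_mem_ids items h.1)

lemma pvPathUp_mem_V (items : List (List (String × String))) (item_id : String) :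
    ∀ (p : List String), pvPathUp items item_id p → ∀ x ∈ p, x ∈ item_id :: pvIds items := by
  intro p
  induction p with
  | nil => intro _ x hx; cases hx
  | cons a t ih =>
    intro h x hx
    rcases List.mem_cons.mp hx with rfl | hx'
    · exact pvPathUp_head_mem_V items item_id t x h
    · cases t with
      | nil => cases hx'
      | cons b rest => exact ih h.2 x hx'

-- a nodup list included in V is no longer than V
lemma nodup_subset_length_le {p V : List String} (hnd : p.Nodup) (hsub : ∀ x ∈ p, x ∈ V) :
    p.length ≤ V.length := by
  calc p.length = p.toFinset.card := (List.toFinset_card_of_nodup hnd).symm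
    _ ≤ V.toFinset.card := Finset.card_le_card (fun x hx => by
        simp only [List.mem_toFinset] at hx ⊢; exact hsub x hx)
    _ ≤ V.length := V.toFinset_card_le

lemma pvIds_length_le (items : List (List (String × String))) :
    (pvIds items).length ≤ items.length := List.length_filterMap_le _ _

-- item_id reaches the head of any nodup path within items.length + 1 steps
lemma pvPathUp_reach_from_root (items : List (List (String × String))) (item_id : String)
    {t : List String} {a : String} (hp : pvPathUp items item_id (a :: t))
    (hnd : (a :: t).Nodup) :
    pvReach items (items.length + 1) item_id a = true := by
  obtain ⟨k, hk, hr⟩ := pvPathUp_reach_head items item_id t a item_id hp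
    (pvPathUp_bottom items item_id _ hp)
  have hlen : (a :: t).length ≤ (item_id :: pvIds items).length :=
    nodup_subset_length_le hnd (pvPathUp_mem_V items item_id _ hp)
  have hids := pvIds_length_le items
  simp only [List.length_cons] at hk hlen
  exact pvReach_mono items hr (by omega)

-- Pre_, unpacked
lemma pre_no_missing {items : List (List (String × String))} {item_id : String}
    (hpre : Pre_get_item_and_children items item_id)
    {d : List (String × String)} (hd : d ∈ items) {p : String}
    (hp : pvGetKey d "parentId" = some p)
    (hr : pvReach items (items.length + 1) item_id p = true) :
    (pvGetKey d "id").isSome = true := by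
  have h := (List.all_eq_true.mp hpre.1) d hd
  rw [hp] at h
  simp only [Bool.or_eq_true] at h
  rcases h with h' | h'
  · rw [hr] at h'; cases h'
  · exact h'

lemma pre_acyclic {items : List (List (String × String))} {item_id : String}
    (hpre : Pre_get_item_and_children items item_id)
    {v c : String} (hv : v ∈ item_id :: pvIds items)
    (hrv : pvReach items (items.length + 1) item_id v = true)
    (hc : c ∈ pvChildrenOf items v)
    (hcv : pvReach items (items.length + 1) c v = true) : False := by
  have h := (List.all_eq_true.mp hpre.2) v hv
  simp only [Bool.or_eq_true] at h
  rcases h with h' | h'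
  · rw [hrv] at h'; cases h'
  · have h2 := (List.all_eq_true.mp h') c hc
    rw [hcv] at h2; cases h2

-- childrenOf distributes over the item scan
lemma pvChildrenOf_cons_matched {d : List (String × String)}
    {l : List (List (String × String))} {pid cid : String}
    (hm : (pvGetKey d "parentId" == some pid) = true)
    (hid : pvGetKey d "id" = some cid) :
    pvChildrenOf (d :: l) pid = cid :: pvChildrenOf l pid := by
  have hkey : pvGetKey d "parentId" = some pid := by simpa using hm
  simp [pvChildrenOf, hkey, hid]

lemma pvChildrenOf_cons_unmatched {d : List (String × String)}
    {l : List (List (String × String))} {pid : String}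
    (hm : ¬ (pvGetKey d "parentId" == some pid) = true) :
    pvChildrenOf (d :: l) pid = pvChildrenOf l pid := by
  have hkey : ¬ pvGetKey d "parentId" = some pid := by simpa using hm
  simp [pvChildrenOf, hkey]

lemma pvChildrenOf_cons_noid {d : List (String × String)}
    {l : List (List (String × String))} {pid : String}
    (hid : pvGetKey d "id" = none) :
    pvChildrenOf (d :: l) pid = pvChildrenOf l pid := by
  rcases eq_or_ne (pvGetKey d "parentId") (some pid) with hk | hk <;>
    simp [pvChildrenOf, hid, hk]

lemma mem_pvChildrenOf_of_mem {d : List (String × String)}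
    {items : List (List (String × String))} {pid cid : String} (hd : d ∈ items)
    (hm : (pvGetKey d "parentId" == some pid) = true)
    (hid : pvGetKey d "id" = some cid) : cid ∈ pvChildrenOf items pid := by
  simp only [pvChildrenOf, List.mem_filterMap]
  exact ⟨d, hd, by rw [if_pos hm]; exact hid⟩

-- the adjacency dict built by B holds exactly the child lists
lemma pvAdj_getD_aux (pid : String) :
    ∀ (l : List (List (String × String))) (adj : PySem.Dict (Option String) (List String)),
      (l.foldl (fun adj item =>
        match pvGetKey item "id" with
        | some cid => adj.modify (pvGetKey item "parentId") [] (fun xs => xs ++ [cid])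
        | none => adj) adj).getD (some pid) []
      = adj.getD (some pid) [] ++ pvChildrenOf l pid := by
  intro l
  induction l with
  | nil => intro adj; simp [pvChildrenOf]
  | cons d l ih =>
    intro adj
    simp only [List.foldl_cons]
    cases hid : pvGetKey d "id" with
    | none =>
      rw [pvChildrenOf_cons_noid hid, ih]
    | some cid =>
      rw [ih]
      by_cases hm : (pvGetKey d "parentId" == some pid) = true
      · have hkey : pvGetKey d "parentId" = some pid := by
          simpa using hm
        rw [pvChildrenOf_cons_matched hm hid, hkey]
        rw [PySem.Dict.getD_modify_self]
        simp
      · have hne : ¬ ((some pid : Option String) = pvGetKey d "parentId") := by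
          intro h; apply hm; rw [← h]; simp
        rw [pvChildrenOf_cons_unmatched hm, PySem.Dict.getD_modify, if_neg hne]

lemma pvAdj_getD (items : List (List (String × String))) (pid : String) :
    (pvAdj items).getD (some pid) [] = pvChildrenOf items pid := by
  have h := pvAdj_getD_aux pid items PySem.Dict.empty
  simpa [pvAdj, PySem.Dict.getD_empty] using h

-- A's scan is a no-op on a set already closed under reachability from the matched children
lemma closedA (items : List (List (String × String))) :
    ∀ (fuel : Nat) (rest : List (List (String × String))) (pid : String) (s : List String),
      (∀ c ∈ pvChildrenOf rest pid, ∀ y, pvRS items c y → y ∈ s) →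
      findAaux items fuel rest s pid = s := by
  intro fuel
  induction fuel with
  | zero =>
    intro rest
    induction rest with
    | nil => intro pid s _; simp [findAaux]
    | cons d rest ihr =>
      intro pid s hcl
      by_cases hm : (pvGetKey d "parentId" == some pid) = true
      · cases hid : pvGetKey d "id" with
        | none => simp [findAaux, hm, hid]
        | some cid =>
          have hc : cid ∈ pvChildrenOf (d :: rest) pid := by
            rw [pvChildrenOf_cons_matched hm hid]; exact List.mem_cons_self
          have hcs : cid ∈ s := hcl cid hc cid (pvRS_refl items cid)
          simp only [findAaux, hm, hid, if_true]
          rw [PySem.Set.add_of_mem hcs]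
          exact ihr pid s (fun c hc' =>
            hcl c (by rw [pvChildrenOf_cons_matched hm hid]; exact List.mem_cons_of_mem _ hc'))
      · rw [show findAaux items 0 (d :: rest) s pid = findAaux items 0 rest s pid from by
          simp [findAaux, hm]]
        exact ihr pid s (fun c hc' =>
          hcl c (by rw [pvChildrenOf_cons_unmatched hm]; exact hc'))
  | succ f ihf =>
    intro rest
    induction rest with
    | nil => intro pid s _; simp [findAaux]
    | cons d rest ihr =>
      intro pid s hcl
      by_cases hm : (pvGetKey d "parentId" == some pid) = true
      · cases hid : pvGetKey d "id" with
        | none => simp [findAaux, hm, hid]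
        | some cid =>
          have hc : cid ∈ pvChildrenOf (d :: rest) pid := by
            rw [pvChildrenOf_cons_matched hm hid]; exact List.mem_cons_self
          have hcs : cid ∈ s := hcl cid hc cid (pvRS_refl items cid)
          simp only [findAaux, hm, hid, if_true]
          rw [PySem.Set.add_of_mem hcs]
          rw [ihf items cid s (fun c hc' y hy =>
            hcl cid hc y (pvRS_cons items hc' hy))]
          exact ihr pid s (fun c hc' =>
            hcl c (by rw [pvChildrenOf_cons_matched hm hid]; exact List.mem_cons_of_mem _ hc'))
      · rw [show findAaux items (f + 1) (d :: rest) s pid = findAaux items (f + 1) rest s pid from by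
          simp [findAaux, hm]]
        exact ihr pid s (fun c hc' =>
          hcl c (by rw [pvChildrenOf_cons_unmatched hm]; exact hc'))

-- any member of the current path reaches the path's head within items.length + 1 steps
lemma mem_path_reach_head (items : List (List (String × String))) (item_id : String)
    {pid : String} {path : List String} {x : String}
    (hpath : pvPathUp items item_id (pid :: path)) (hnd : (pid :: path).Nodup)
    (hx : x ∈ pid :: path) : pvReach items (items.length + 1) x pid = true := by
  obtain ⟨k, hk, hr⟩ := pvPathUp_reach_head items item_id path pid x hpath hx
  have hlen := nodup_subset_length_le hnd (pvPathUp_mem_V items item_id _ hpath)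
  have hids := pvIds_length_le items
  simp only [List.length_cons] at hk hlen
  exact pvReach_mono items hr (by omega)

-- acyclicity: a child of the path's head is never on the path
lemma cid_not_on_path {items : List (List (String × String))} {item_id : String}
    (hpre : Pre_get_item_and_children items item_id) {pid cid : String} {path : List String}
    (hpath : pvPathUp items item_id (pid :: path)) (hnd : (pid :: path).Nodup)
    (hc : cid ∈ pvChildrenOf items pid) : cid ∉ pid :: path := by
  intro hmem
  exact pre_acyclic hpre (pvPathUp_head_mem_V items item_id path pid hpath)
    (pvPathUp_reach_from_root items item_id hpath hnd) hc
    (mem_path_reach_head items item_id hpath hnd hmem)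

-- main coupling invariant between A's scan and B's guarded DFS
lemma mainLoop (items : List (List (String × String))) (item_id : String)
    (hpre : Pre_get_item_and_children items item_id) :
    ∀ (fuel : Nat) (rest : List (List (String × String))) (pid : String)
      (path : List String) (s : List String),
      (∀ d ∈ rest, d ∈ items) →
      pvPathUp items item_id (pid :: path) →
      (pid :: path).Nodup →
      ((item_id :: pvIds items).length ≤ fuel + (pid :: path).length) →
      (∀ x ∈ s, (∀ y, pvRS items x y → y ∈ s) ∨ x ∈ pid :: path) →
      findAaux items fuel rest s pid = dfsB (pvAdj items) fuel (pvChildrenOf rest pid) s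
      ∧ (∀ x ∈ s, x ∈ dfsB (pvAdj items) fuel (pvChildrenOf rest pid) s)
      ∧ (∀ x ∈ dfsB (pvAdj items) fuel (pvChildrenOf rest pid) s,
          x ∈ s ∨ ∃ c ∈ pvChildrenOf rest pid, pvRS items c x)
      ∧ (∀ c ∈ pvChildrenOf rest pid, ∀ y, pvRS items c y →
          y ∈ dfsB (pvAdj items) fuel (pvChildrenOf rest pid) s) := by
  intro fuel
  induction fuel with
  | zero =>
    intro rest
    induction rest with
    | nil =>
      intro pid path s _ _ _ _ _
      have hch : pvChildrenOf ([] : List (List (String × String))) pid = [] := rfl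
      have hB : dfsB (pvAdj items) 0 (pvChildrenOf ([] : List (List (String × String))) pid) s = s := by
        rw [hch]; simp [dfsB]
      refine ⟨by rw [hB]; simp [findAaux], ?_, ?_, ?_⟩
      · intro x hx; rw [hB]; exact hx
      · intro x hx; rw [hB] at hx; exact Or.inl hx
      · intro c hc; rw [hch] at hc; cases hc
    | cons d rest ihr =>
      intro pid path s hrest hpath hnd hfuel hs
      have hdi : d ∈ items := hrest d List.mem_cons_self
      have hrest' : ∀ d' ∈ rest, d' ∈ items := fun d' hd' => hrest d' (List.mem_cons_of_mem _ hd')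
      by_cases hm : (pvGetKey d "parentId" == some pid) = true
      · cases hid : pvGetKey d "id" with
        | none =>
          -- A would raise KeyError; impossible under Pre_ since pid is reachable
          exfalso
          have hkey : pvGetKey d "parentId" = some pid := by simpa using hm
          have := pre_no_missing hpre hdi hkey
            (pvPathUp_reach_from_root items item_id hpath hnd)
          rw [hid] at this; cases this
        | some cid =>
          have hc : cid ∈ pvChildrenOf items pid := mem_pvChildrenOf_of_mem hdi hm hid
          have hchl : pvChildrenOf (d :: rest) pid = cid :: pvChildrenOf rest pid :=
            pvChildrenOf_cons_matched hm hid
          by_cases hcs : cid ∈ s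
          · -- seen child: A's descent is a no-op, B skips
            have hclosed : ∀ y, pvRS items cid y → y ∈ s := by
              rcases hs cid hcs with h | h
              · exact h
              · exact absurd h (cid_not_on_path hpre hpath hnd hc)
            have hA : findAaux items 0 (d :: rest) s pid = findAaux items 0 rest s pid := by
              simp only [findAaux, hm, hid, if_true]
              rw [PySem.Set.add_of_mem hcs]
            have hB : dfsB (pvAdj items) 0 (pvChildrenOf (d :: rest) pid) s
                = dfsB (pvAdj items) 0 (pvChildrenOf rest pid) s := by
              rw [hchl]; simp [dfsB, hcs]
            obtain ⟨ih1, ih2, ih3, ih4⟩ := ihr pid path s hrest' hpath hnd hfuel hs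
            refine ⟨by rw [hA, hB, ih1], by rw [hB]; exact ih2, ?_, ?_⟩
            · intro x hx
              rw [hB] at hx
              rcases ih3 x hx with h | ⟨c, hcm, hrs⟩
              · exact Or.inl h
              · exact Or.inr ⟨c, by rw [hchl]; exact List.mem_cons_of_mem _ hcm, hrs⟩
            · intro c hcm y hy
              rw [hchl] at hcm
              rw [hB]
              rcases List.mem_cons.mp hcm with rfl | hcm'
              · exact ih2 y (hclosed y hy)
              · exact ih4 c hcm' y hy
          · -- fresh child with fuel 0: impossible (the path would exceed the id universe)
            exfalso
            have hnotp : cid ∉ pid :: path := cid_not_on_path hpre hpath hnd hc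
            have hnd' : (cid :: pid :: path).Nodup := List.nodup_cons.mpr ⟨hnotp, hnd⟩
            have hsub : ∀ x ∈ cid :: pid :: path, x ∈ item_id :: pvIds items :=
              pvPathUp_mem_V items item_id _ (⟨hc, hpath⟩ : pvPathUp items item_id (cid :: pid :: path))
            have hlen := nodup_subset_length_le hnd' hsub
            simp only [List.length_cons] at hlen hfuel
            omega
      · -- unmatched item: both sides skip it
        have hA : findAaux items 0 (d :: rest) s pid = findAaux items 0 rest s pid := by
          simp [findAaux, hm]
        have hchl := pvChildrenOf_cons_unmatched (l := rest) (pid := pid) hm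
        obtain ⟨ih1, ih2, ih3, ih4⟩ := ihr pid path s hrest' hpath hnd hfuel hs
        exact ⟨by rw [hA, hchl, ih1], by rw [hchl]; exact ih2,
          by rw [hchl]; exact ih3, by rw [hchl]; exact ih4⟩
  | succ f ihf =>
    intro rest
    induction rest with
    | nil =>
      intro pid path s _ _ _ _ _
      have hch : pvChildrenOf ([] : List (List (String × String))) pid = [] := rfl
      have hB : dfsB (pvAdj items) (f + 1) (pvChildrenOf ([] : List (List (String × String))) pid) s = s := by
        rw [hch]; simp [dfsB]
      refine ⟨by rw [hB]; simp [findAaux], ?_, ?_, ?_⟩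
      · intro x hx; rw [hB]; exact hx
      · intro x hx; rw [hB] at hx; exact Or.inl hx
      · intro c hc; rw [hch] at hc; cases hc
    | cons d rest ihr =>
      intro pid path s hrest hpath hnd hfuel hs
      have hdi : d ∈ items := hrest d List.mem_cons_self
      have hrest' : ∀ d' ∈ rest, d' ∈ items := fun d' hd' => hrest d' (List.mem_cons_of_mem _ hd')
      by_cases hm : (pvGetKey d "parentId" == some pid) = true
      · cases hid : pvGetKey d "id" with
        | none =>
          exfalso
          have hkey : pvGetKey d "parentId" = some pid := by simpa using hm
          have := pre_no_missing hpre hdi hkey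
            (pvPathUp_reach_from_root items item_id hpath hnd)
          rw [hid] at this; cases this
        | some cid =>
          have hc : cid ∈ pvChildrenOf items pid := mem_pvChildrenOf_of_mem hdi hm hid
          have hchl : pvChildrenOf (d :: rest) pid = cid :: pvChildrenOf rest pid :=
            pvChildrenOf_cons_matched hm hid
          by_cases hcs : cid ∈ s
          · -- seen child: A's descent is a no-op (the set is closed), B skips
            have hclosed : ∀ y, pvRS items cid y → y ∈ s := by
              rcases hs cid hcs with h | h
              · exact h
              · exact absurd h (cid_not_on_path hpre hpath hnd hc)
            have hA : findAaux items (f + 1) (d :: rest) s pid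
                = findAaux items (f + 1) rest s pid := by
              simp only [findAaux, hm, hid, if_true]
              rw [PySem.Set.add_of_mem hcs]
              rw [closedA items f items cid s
                (fun c' hc' y hy => hclosed y (pvRS_cons items hc' hy))]
            have hB : dfsB (pvAdj items) (f + 1) (pvChildrenOf (d :: rest) pid) s
                = dfsB (pvAdj items) (f + 1) (pvChildrenOf rest pid) s := by
              rw [hchl]; simp [dfsB, hcs]
            obtain ⟨ih1, ih2, ih3, ih4⟩ := ihr pid path s hrest' hpath hnd hfuel hs
            refine ⟨by rw [hA, hB, ih1], by rw [hB]; exact ih2, ?_, ?_⟩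
            · intro x hx
              rw [hB] at hx
              rcases ih3 x hx with h | ⟨c, hcm, hrs⟩
              · exact Or.inl h
              · exact Or.inr ⟨c, by rw [hchl]; exact List.mem_cons_of_mem _ hcm, hrs⟩
            · intro c hcm y hy
              rw [hchl] at hcm
              rw [hB]
              rcases List.mem_cons.mp hcm with rfl | hcm'
              · exact ih2 y (hclosed y hy)
              · exact ih4 c hcm' y hy
          · -- fresh child: both sides add it and descend, then continue the scan
            have hnotp : cid ∉ pid :: path := cid_not_on_path hpre hpath hnd hc
            have hpath' : pvPathUp items item_id (cid :: pid :: path) := ⟨hc, hpath⟩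
            have hnd' : (cid :: pid :: path).Nodup := List.nodup_cons.mpr ⟨hnotp, hnd⟩
            have hfuel' : (item_id :: pvIds items).length ≤ f + (cid :: pid :: path).length := by
              simp only [List.length_cons] at hfuel ⊢; omega
            have hs' : ∀ x ∈ PySem.Set.add s cid,
                (∀ y, pvRS items x y → y ∈ PySem.Set.add s cid) ∨ x ∈ cid :: pid :: path := by
              intro x hx
              rcases (PySem.Set.mem_add _ _ _).mp hx with hx' | rfl
              · rcases hs x hx' with h | h
                · exact Or.inl (fun y hy => (PySem.Set.mem_add _ _ _).mpr (Or.inl (h y hy)))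
                · exact Or.inr (List.mem_cons_of_mem _ h)
              · exact Or.inr List.mem_cons_self
            obtain ⟨sub1, sub2, sub3, sub4⟩ :=
              ihf items cid (pid :: path) (PySem.Set.add s cid) (fun d' hd' => hd')
                hpath' hnd' hfuel' hs'
            -- rc: the set after the full descent into cid
            have hsrc : ∀ x ∈ dfsB (pvAdj items) f (pvChildrenOf items cid) (PySem.Set.add s cid),
                (∀ y, pvRS items x y →
                  y ∈ dfsB (pvAdj items) f (pvChildrenOf items cid) (PySem.Set.add s cid))
                ∨ x ∈ pid :: path := by
              intro x hx
              rcases sub3 x hx with hx' | ⟨c', hc', hrs⟩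
              · rcases (PySem.Set.mem_add _ _ _).mp hx' with hxs | rfl
                · rcases hs x hxs with h | h
                  · exact Or.inl (fun y hy => sub2 y ((PySem.Set.mem_add _ _ _).mpr (Or.inl (h y hy))))
                  · exact Or.inr h
                · refine Or.inl (fun y hy => ?_)
                  rcases pvRS_destruct items hy with rfl | ⟨c', hc', hrs⟩
                  · exact sub2 y ((PySem.Set.mem_add _ _ _).mpr (Or.inr rfl))
                  · exact sub4 c' hc' y hrs
              · refine Or.inl (fun y hy => ?_)
                exact sub4 c' hc' y (pvRS_trans items hrs hy)
            obtain ⟨ih1, ih2, ih3, ih4⟩ :=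
              ihr pid path (dfsB (pvAdj items) f (pvChildrenOf items cid) (PySem.Set.add s cid))
                hrest' hpath hnd hfuel hsrc
            have hA : findAaux items (f + 1) (d :: rest) s pid
                = findAaux items (f + 1) rest
                    (dfsB (pvAdj items) f (pvChildrenOf items cid) (PySem.Set.add s cid)) pid := by
              simp only [findAaux, hm, hid, if_true]
              rw [sub1]
            have hB : dfsB (pvAdj items) (f + 1) (pvChildrenOf (d :: rest) pid) s
                = dfsB (pvAdj items) (f + 1) (pvChildrenOf rest pid)
                    (dfsB (pvAdj items) f (pvChildrenOf items cid) (PySem.Set.add s cid)) := by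
              rw [hchl,
                show dfsB (pvAdj items) (f + 1) (cid :: pvChildrenOf rest pid) s
                  = dfsB (pvAdj items) (f + 1) (pvChildrenOf rest pid)
                      (dfsB (pvAdj items) f ((pvAdj items).getD (some cid) []) (PySem.Set.add s cid))
                  from by simp [dfsB, hcs],
                pvAdj_getD items cid]
            refine ⟨by rw [hA, hB, ih1], ?_, ?_, ?_⟩
            · intro x hx
              rw [hB]
              exact ih2 x (sub2 x ((PySem.Set.mem_add _ _ _).mpr (Or.inl hx)))
            · intro x hx
              rw [hB] at hx
              rcases ih3 x hx with hx' | ⟨c, hcm, hrs⟩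
              · rcases sub3 x hx' with hx'' | ⟨c', hc', hrs⟩
                · rcases (PySem.Set.mem_add _ _ _).mp hx'' with hxs | rfl
                  · exact Or.inl hxs
                  · exact Or.inr ⟨x, by rw [hchl]; exact List.mem_cons_self, pvRS_refl items x⟩
                · exact Or.inr ⟨cid, by rw [hchl]; exact List.mem_cons_self,
                    pvRS_cons items hc' hrs⟩
              · exact Or.inr ⟨c, by rw [hchl]; exact List.mem_cons_of_mem _ hcm, hrs⟩
            · intro c hcm y hy
              rw [hchl] at hcm
              rw [hB]
              rcases List.mem_cons.mp hcm with rfl | hcm'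
              · rcases pvRS_destruct items hy with rfl | ⟨c', hc', hrs⟩
                · exact ih2 y (sub2 y ((PySem.Set.mem_add _ _ _).mpr (Or.inr rfl)))
                · exact ih2 y (sub4 c' hc' y hrs)
              · exact ih4 c hcm' y hy
      · have hA : findAaux items (f + 1) (d :: rest) s pid
            = findAaux items (f + 1) rest s pid := by
          simp [findAaux, hm]
        have hchl := pvChildrenOf_cons_unmatched (l := rest) (pid := pid) hm
        obtain ⟨ih1, ih2, ih3, ih4⟩ := ihr pid path s hrest' hpath hnd hfuel hs
        exact ⟨by rw [hA, hchl, ih1], by rw [hchl]; exact ih2,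
          by rw [hchl]; exact ih3, by rw [hchl]; exact ih4⟩

-- ===== VERDICT (by name: the statement is the Claim_ definition above) =====
theorem get_item_and_children_spec : Claim_equal_get_item_and_children := by
  intro items item_id _ hpre
  unfold Spec_get_item_and_children get_item_and_children get_item_and_children_alt
  have h := mainLoop items item_id hpre (items.length + 1) items item_id [] (PySem.Set.ofList [item_id])
    (fun d hd => hd)
    (by simp [pvPathUp])
    (by simp)
    (by simp only [List.length_cons, List.length_nil]
        have := pvIds_length_le items; omega)
    (by intro x hx
        simp only [PySem.Set.ofList] at hx
        right
        simpa using hx)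
  show findAaux items (items.length + 1) items (PySem.Set.ofList [item_id]) item_id
      = dfsB (pvAdj items) (items.length + 1) ((pvAdj items).getD (some item_id) [])
          (PySem.Set.ofList [item_id])
  rw [pvAdj_getD items item_id]
  exact h.1
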